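-- pv_equiv track=rewrite | github.com/nico4021/sim_tp3 | sim/tp4/funciones.py | mandado_a_cola
-- ===== SOURCE A (Python) =====
-- def mandado_a_cola(lista):
--     indice = -1
--     for i in range(len(lista)):
--         if indice == -1:
--             indice = i
--         if len(lista[i]) < len(lista[indice]):
--             indice = i
--     return indice
-- ===== SOURCE B (Python) =====
-- def mandado_a_cola(lista):
--     if not lista:
--         return -1
--     orden = sorted(range(len(lista)), key=lambda i: len(lista[i]))
--     return orden[0]
-- ===== Notes on version B (the rewrite author's own statement) =====
-- stated objective: alternative
-- what changed: Replaced A's single-pass running-minimum loop with sentinel -1 by an empty-list guard plus sorting the index range by element length and returning the first index; Python's stable sort keeps the lowest index on length ties, matching A's first-shortest-wins rule.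
import Mathlib
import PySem

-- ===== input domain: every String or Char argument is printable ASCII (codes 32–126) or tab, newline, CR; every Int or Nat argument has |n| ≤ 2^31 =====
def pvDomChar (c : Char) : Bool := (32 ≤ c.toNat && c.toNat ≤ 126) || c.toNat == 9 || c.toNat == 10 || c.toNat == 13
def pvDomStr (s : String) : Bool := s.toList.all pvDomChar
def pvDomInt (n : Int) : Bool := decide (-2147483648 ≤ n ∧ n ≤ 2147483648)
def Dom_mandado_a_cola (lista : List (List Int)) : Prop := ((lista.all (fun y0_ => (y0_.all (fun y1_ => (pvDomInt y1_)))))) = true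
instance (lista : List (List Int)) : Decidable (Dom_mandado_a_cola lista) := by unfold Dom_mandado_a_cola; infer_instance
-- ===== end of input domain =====

-- B replaces A's running-minimum loop (sentinel -1) by an empty-list guard plus a stable sort
-- of the index range by element length, returning the first sorted index (same result; O(n log n)).

-- ===== PORT A =====
def mandado_a_cola (lista : List (List Int)) : Int :=
  (PySem.List.pyRange 0 lista.length 1).foldl
    (fun indice i =>
      let indice := if indice = -1 then i else indice
      if (PySem.List.pyGetD lista i []).length < (PySem.List.pyGetD lista indice []).length
      then i else indice)
    (-1)

-- ===== PORT B =====
def mandado_a_cola_alt (lista : List (List Int)) : Int :=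
  match lista with
  | [] => -1
  | _ :: _ =>
    let orden := PySem.List.sorted (PySem.List.pyRange 0 lista.length 1)
      (fun i => (PySem.List.pyGetD lista i []).length) false
    match orden with
    | m :: _ => m
    | [] => -1  -- unreachable: sorted of a nonempty range is nonempty

-- ===== PRECONDITION & SPEC =====
def Spec_mandado_a_cola (lista : List (List Int)) (out : Int) : Prop := out = mandado_a_cola_alt lista
instance (lista : List (List Int)) (out : Int) : Decidable (Spec_mandado_a_cola lista out) := by unfold Spec_mandado_a_cola; infer_instance

-- ===== CLAIM (what is proved, stated in full; the proofs are below) =====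
def Claim_equal_mandado_a_cola : Prop := ∀ (lista : List (List Int)), Dom_mandado_a_cola lista → Spec_mandado_a_cola lista (mandado_a_cola lista)

-- ===== LEMMAS AND PROOFS =====

-- The "first index of minimal key" fold that both programs compute.
def pvRunMin (key : Int → Nat) (j : Int) (xs : List Int) : Int :=
  xs.foldl (fun m y => if key y < key m then y else m) j

-- A's loop body, once the -1 sentinel can no longer occur, is pvRunMin.
theorem afold_eq_runMin (lista : List (List Int)) :
    ∀ (xs : List Int) (j : Int), j ≠ -1 → (∀ x ∈ xs, x ≠ -1) →
    xs.foldl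
      (fun indice i =>
        let indice := if indice = -1 then i else indice
        if (PySem.List.pyGetD lista i []).length < (PySem.List.pyGetD lista indice []).length
        then i else indice) j
      = pvRunMin (fun i => (PySem.List.pyGetD lista i []).length) j xs := by
  intro xs
  induction xs with
  | nil => intro j _ _; rfl
  | cons x t ih =>
    intro j hj hx
    have hx' : ∀ y ∈ t, y ≠ -1 := fun y hy => hx y (List.mem_cons_of_mem _ hy)
    have hxne : x ≠ -1 := hx x List.mem_cons_self
    simp only [List.foldl_cons, pvRunMin, if_neg hj]
    by_cases h : (PySem.List.pyGetD lista x []).length < (PySem.List.pyGetD lista j []).length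
    · simp only [if_pos h]; exact ih x hxne hx'
    · simp only [if_neg h]; exact ih j hj hx'

-- Inserting y into a nonempty accumulator: the head is updated exactly as a running minimum.
theorem head_insertBy (key : Int → Nat) (y h : Int) (t : List Int) :
    PySem.List.insertBy (fun a b => decide (key a < key b)) y (h :: t)
      = (if key y < key h then y else h) ::
        (if key y < key h then h :: t
         else PySem.List.insertBy (fun a b => decide (key a < key b)) y t) := by
  by_cases hc : key y < key h <;> simp [PySem.List.insertBy, hc]

-- Head of the insertion-sort fold over a nonempty accumulator = running minimum from its head.
theorem head_foldl_insertBy (key : Int → Nat) :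
    ∀ (xs : List Int) (h : Int) (t : List Int),
    ∃ r, xs.foldl (fun acc x => PySem.List.insertBy (fun a b => decide (key a < key b)) x acc) (h :: t)
      = pvRunMin key h xs :: r := by
  intro xs
  induction xs with
  | nil => intro h t; exact ⟨t, rfl⟩
  | cons y ys ih =>
    intro h t
    simp only [List.foldl_cons, head_insertBy, pvRunMin]
    by_cases hc : key y < key h
    · simp only [if_pos hc]
      exact ih y (h :: t)
    · simp only [if_neg hc]
      exact ih h _

-- A's whole fold from the -1 sentinel over 0 :: xs is the running minimum from index 0.
theorem afold_sentinel (lista : List (List Int)) (xs : List Int) (hx : ∀ x ∈ xs, x ≠ -1) :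
    (0 :: xs).foldl
      (fun indice i =>
        let indice := if indice = -1 then i else indice
        if (PySem.List.pyGetD lista i []).length < (PySem.List.pyGetD lista indice []).length
        then i else indice) (-1)
      = pvRunMin (fun i => (PySem.List.pyGetD lista i []).length) 0 xs := by
  have h : (List.foldl
      (fun indice i =>
        let indice := if indice = -1 then i else indice
        if (PySem.List.pyGetD lista i []).length < (PySem.List.pyGetD lista indice []).length
        then i else indice) (0 : Int) xs)
      = pvRunMin (fun i => (PySem.List.pyGetD lista i []).length) 0 xs :=
    afold_eq_runMin lista xs 0 (by decide) hx
  simpa using h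

-- The sorted index list of a nonempty range starts with the first index of minimal key.
theorem head_sorted (key : Int → Nat) (j : Int) (xs : List Int) :
    ∃ r, PySem.List.sorted (j :: xs) key false = pvRunMin key j xs :: r := by
  rw [PySem.List.sorted_eq_foldl_insertBy]
  simpa using head_foldl_insertBy key xs j []

-- ===== VERDICT (by name: the statement is the Claim_ definition above) =====
theorem mandado_a_cola_spec : Claim_equal_mandado_a_cola := by
  intro lista _
  unfold Spec_mandado_a_cola
  match lista with
  | [] => rfl
  | a :: t =>
    have hlen : (0 : Int) < ((a :: t).length : Int) := by exact_mod_cast Nat.succ_pos t.length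
    have hr : PySem.List.pyRange 0 ((a :: t).length : Int) 1
        = 0 :: PySem.List.pyRange 1 ((a :: t).length : Int) 1 := by
      simpa using PySem.List.pyRange_one_cons hlen
    have hmem : ∀ x ∈ PySem.List.pyRange 1 ((a :: t).length : Int) 1, x ≠ (-1 : Int) := by
      intro x hx
      have := (PySem.List.mem_pyRange_one).1 hx
      omega
    unfold mandado_a_cola mandado_a_cola_alt
    obtain ⟨r, hs⟩ := head_sorted (fun i => (PySem.List.pyGetD (a :: t) i []).length) 0
      (PySem.List.pyRange 1 ((a :: t).length : Int) 1)
    rw [hr, afold_sentinel (a :: t) _ hmem]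
    simp only [hs]
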